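-- pv_equiv track=rewrite | github.com/ttzytt/PyAutoGrade | tests/ex2/tested_code/11/Unit 1/Cards/card_functions_review_1.py | catch_cheater
-- ===== SOURCE A (Python) =====
-- def catch_cheater(cards_played, initial_card, num_players, starting_player):
--
--     if len(cards_played) == 0:
--         return None
--
--
--
--     def is_legal_move(card_1, card_2):
--         if card_1[0] == card_2[0] or card_1[1] == card_2[1]:
--             return True
--         return False
--
--     increasing_move_order = True
--
--
--     if not is_legal_move(initial_card, cards_played[0]):
--         return starting_player
--     if cards_played[0][1] == 'skip':
--         starting_player += 1
--     if cards_played[0][1] == 'reverse':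
--         increasing_move_order = False
--
--
--     if increasing_move_order:
--         player_turn = starting_player + 1
--     else:
--         player_turn = starting_player - 1
--
--     player_turn = player_turn % num_players
--
--
--
--     for i in range(len(cards_played)-1):
--         added_skip = 0
--         if not is_legal_move(cards_played[i], cards_played[i+1]):
--             return player_turn
--         if cards_played[i+1][1] == 'skip':
--             added_skip = 1
--         elif cards_played[i+1][1] == 'reverse':
--             increasing_move_order = not increasing_move_order
--
--
--         if increasing_move_order:
--             player_turn += (1 + added_skip)
--         else:
--             player_turn -=  (1 + added_skip)
--         player_turn = player_turn % num_players
--     return None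
-- ===== SOURCE B (Python) =====
-- def first_illegal(seq):
--     # index j of the first adjacent pair (seq[j], seq[j+1]) matching in
--     # neither rank nor suit, or None
--     for j in range(len(seq) - 1):
--         if seq[j][0] != seq[j + 1][0] and seq[j][1] != seq[j + 1][1]:
--             return j
--     return None
--
--
-- def catch_cheater(cards_played, initial_card, num_players, starting_player):
--     seq = [initial_card] + list(cards_played)
--     k = first_illegal(seq)
--     if k is None:
--         return None
--     if k == 0:
--         return starting_player
--     # closed-form displacement over the first k played cards: direction is the
--     # parity of 'reverse' cards seen so far; a single modulo at the end
--     total = 0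
--     down = False
--     for card in cards_played[:k]:
--         if card[1] == 'reverse':
--             down = not down
--         step = 2 if card[1] == 'skip' else 1
--         total += -step if down else step
--     return (starting_player + total) % num_players
-- ===== Notes on version B (the rewrite author's own statement) =====
-- stated objective: alternative
-- what changed: A simulates the game step by step (position and direction updated and reduced mod num_players after every card, with the first card handled in a special prologue); B instead first locates the index k of the first illegal adjacent pair in seq=[initial]+cards, then computes the winner in closed form as (starting_player + signed displacement over cards[:k]) with a single final modulo, relying on ((x%n)+d)%n=(x+d)%n.
import Mathlib
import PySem

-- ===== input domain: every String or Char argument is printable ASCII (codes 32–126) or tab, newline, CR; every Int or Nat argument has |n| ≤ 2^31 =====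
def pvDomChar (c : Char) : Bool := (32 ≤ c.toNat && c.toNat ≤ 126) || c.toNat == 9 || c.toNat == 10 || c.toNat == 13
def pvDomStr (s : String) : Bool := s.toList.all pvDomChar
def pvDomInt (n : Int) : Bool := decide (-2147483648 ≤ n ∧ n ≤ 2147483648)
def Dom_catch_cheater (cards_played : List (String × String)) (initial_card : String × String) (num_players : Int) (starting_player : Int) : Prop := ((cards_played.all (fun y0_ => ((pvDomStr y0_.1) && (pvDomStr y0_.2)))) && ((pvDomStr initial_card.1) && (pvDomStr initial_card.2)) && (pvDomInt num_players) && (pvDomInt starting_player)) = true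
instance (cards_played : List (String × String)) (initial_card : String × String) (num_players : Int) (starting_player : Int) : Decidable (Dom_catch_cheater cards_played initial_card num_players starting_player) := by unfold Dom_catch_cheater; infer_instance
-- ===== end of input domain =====

-- B replaces A's step-by-step modded simulation (special-cased first card, position
-- reduced mod num_players after every move) by two stages: locate the first illegal
-- adjacent pair, then compute the answer as one signed displacement sum with a single
-- final modulo (objective: alternative; same O(n) cost).

-- ===== PORT A =====
-- is_legal_move of A
def pvIsLegalA (c1 c2 : String × String) : Bool :=
  c1.1 == c2.1 || c1.2 == c2.2

-- A's `for i in range(len(cards_played)-1)` loop, recursing over the index list;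
-- indexing cards_played[i] is PySem.List.pyGet? with getD (every index A uses is in range).
def pvLoopA (cards : List (String × String)) (np : Int) :
    List Int → Int → Bool → Option Int
  | [], _, _ => none
  | i :: rest, player_turn, inc =>
    let c1 := (PySem.List.pyGet? cards i).getD ("", "")
    let c2 := (PySem.List.pyGet? cards (i + 1)).getD ("", "")
    if !pvIsLegalA c1 c2 then some player_turn
    else
      let added_skip : Int := if c2.2 == "skip" then 1 else 0
      let inc' := if c2.2 == "skip" then inc
                  else if c2.2 == "reverse" then !inc else inc
      let pt := if inc' then player_turn + (1 + added_skip)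
                else player_turn - (1 + added_skip)
      pvLoopA cards np rest (PySem.Int.mod pt np) inc'

def catch_cheater (cards_played : List (String × String)) (initial_card : String × String) (num_players : Int) (starting_player : Int) : Option Int :=
  if cards_played.length == 0 then none
  else
    let c0 := (PySem.List.pyGet? cards_played 0).getD ("", "")
    if !pvIsLegalA initial_card c0 then some starting_player
    else
      let sp := if c0.2 == "skip" then starting_player + 1 else starting_player
      let inc := if c0.2 == "reverse" then false else true
      let player_turn := if inc then sp + 1 else sp - 1
      pvLoopA cards_played num_players
        (PySem.List.pyRange 0 ((cards_played.length : Int) - 1) 1)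
        (PySem.Int.mod player_turn num_players) inc

-- ===== PORT B =====
-- B's first_illegal: index of the first adjacent pair matching in neither component.
def pvFirstIllegal : List (String × String) → Option Nat
  | a :: b :: rest =>
    if a.1 != b.1 && a.2 != b.2 then some 0
    else (pvFirstIllegal (b :: rest)).map (· + 1)
  | _ => none

-- B's stage-2 loop: accumulate the signed displacement; `down` is the reverse parity.
def pvTotalDown : List (String × String) → Int → Bool → Int
  | [], total, _ => total
  | card :: rest, total, down =>
    let down' := if card.2 == "reverse" then !down else down
    let step : Int := if card.2 == "skip" then 2 else 1
    pvTotalDown rest (total + (if down' then -step else step)) down'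

def catch_cheater_alt (cards_played : List (String × String)) (initial_card : String × String) (num_players : Int) (starting_player : Int) : Option Int :=
  match pvFirstIllegal (initial_card :: cards_played) with
  | none => none
  | some 0 => some starting_player
  | some k => some (PySem.Int.mod
      (starting_player + pvTotalDown (cards_played.take k) 0 false) num_players)

-- ===== PRECONDITION & SPEC =====
-- Pre_ excludes exactly the inputs where A raises ZeroDivisionError: num_players = 0
-- with a nonempty card list whose first move is legal (the first `% num_players` is
-- reached). No input on which A returns a value is excluded.
def Pre_catch_cheater (cards_played : List (String × String)) (initial_card : String × String) (num_players : Int) (starting_player : Int) : Prop :=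
  num_players ≠ 0 ∨ cards_played = [] ∨
    (initial_card.1 ≠ (cards_played.headD ("", "")).1 ∧
     initial_card.2 ≠ (cards_played.headD ("", "")).2)
instance (cards_played : List (String × String)) (initial_card : String × String) (num_players : Int) (starting_player : Int) : Decidable (Pre_catch_cheater cards_played initial_card num_players starting_player) := by unfold Pre_catch_cheater; infer_instance

def pvWitness_catch_cheater : (List (String × String)) × (String × String) × Int × Int :=
  ([("3", "hearts"), ("3", "skip")], ("3", "spades"), 4, 0)

def Spec_catch_cheater (cards_played : List (String × String)) (initial_card : String × String) (num_players : Int) (starting_player : Int) (out : Option Int) : Prop := out = catch_cheater_alt cards_played initial_card num_players starting_player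
instance (cards_played : List (String × String)) (initial_card : String × String) (num_players : Int) (starting_player : Int) (out : Option Int) : Decidable (Spec_catch_cheater cards_played initial_card num_players starting_player out) := by unfold Spec_catch_cheater; infer_instance

-- ===== CLAIM (what is proved, stated in full; the proofs are below) =====
def Claim_equal_catch_cheater : Prop := ∀ (cards_played : List (String × String)) (initial_card : String × String) (num_players : Int) (starting_player : Int), Dom_catch_cheater cards_played initial_card num_players starting_player → Pre_catch_cheater cards_played initial_card num_players starting_player → Spec_catch_cheater cards_played initial_card num_players starting_player (catch_cheater cards_played initial_card num_players starting_player)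


-- ===== LEMMAS AND PROOFS =====

-- proof-side intermediate: the single-pass simulation A's loop amounts to.
def pvLoopB (np : Int) :
    (String × String) → List (String × String) → Int → Bool → Option Int
  | _, [], _, _ => none
  | prev, card :: rest, current, inc =>
    if prev.1 != card.1 && prev.2 != card.2 then some current
    else
      let step : Int := if card.2 == "skip" then 2 else 1
      let inc' := if card.2 == "reverse" then !inc else inc
      pvLoopB np card rest
        (PySem.Int.mod (current + (if inc' then step else -step)) np) inc'

-- Python's floor-mod is additive through intermediate reductions (any divisor).
theorem pvModAdd (a b n : Int) :
    PySem.Int.mod (PySem.Int.mod a n + b) n = PySem.Int.mod (a + b) n := by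
  simp [PySem.Int.mod]

theorem pvTotalDown_shift (l : List (String × String)) :
    ∀ (a b : Int) (d : Bool), pvTotalDown l (a + b) d = a + pvTotalDown l b d := by
  induction l with
  | nil => intro a b d; rfl
  | cons c rest ih =>
    intro a b d
    rw [pvTotalDown, pvTotalDown]
    rw [add_assoc]
    exact ih a _ _

-- key invariant 1: A's index loop starting at index |pre| over cards = pre ++ c :: tl
-- computes the same as the single-pass loop with prev = c and remaining tl.
set_option maxRecDepth 4096 in
theorem pvLoop_eq (np : Int) :
    ∀ (tl : List (String × String)) (pre : List (String × String))
      (c : String × String) (pt : Int) (inc : Bool),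
    pvLoopA (pre ++ c :: tl) np
      (PySem.List.pyRange (pre.length : Int)
        ((pre.length + tl.length : Nat) : Int) 1) pt inc
    = pvLoopB np c tl pt inc := by
  intro tl
  induction tl with
  | nil =>
    intro pre c pt inc
    rw [PySem.List.pyRange_one_eq_nil (by simp)]
    rfl
  | cons d tl' ih =>
    intro pre c pt inc
    rw [PySem.List.pyRange_one_cons (by simp only [List.length_cons]; push_cast; omega)]
    rw [pvLoopA]
    rw [PySem.List.pyGet?_append_length pre (d :: tl') c]
    have h2 : PySem.List.pyGet? (pre ++ c :: d :: tl') ((pre.length : Int) + 1) = some d := by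
      simpa using PySem.List.pyGet?_append_right pre (c :: d :: tl') 1
    rw [h2]
    simp only [Option.getD_some]
    rw [pvLoopB]
    have ih' : ∀ (pt : Int) (i : Bool),
        pvLoopA (pre ++ c :: d :: tl') np
          (PySem.List.pyRange ((pre.length : Int) + 1)
            ((pre.length : Int) + ((tl'.length : Int) + 1)) 1) pt i
        = pvLoopB np d tl' pt i := by
      intro pt i
      have h := ih (pre ++ [c]) d pt i
      have e1 : pre ++ [c] ++ d :: tl' = pre ++ c :: d :: tl' := by simp
      have e2 : (((pre ++ [c]).length : Nat) : Int) = (pre.length : Int) + 1 := by simp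
      have e3 : (((pre ++ [c]).length + tl'.length : Nat) : Int)
          = (pre.length : Int) + ((tl'.length : Int) + 1) := by push_cast; simp; ring
      rw [e1, e2, e3] at h
      exact h
    by_cases hleg : pvIsLegalA c d = true
    · have hb : (c.1 != d.1 && c.2 != d.2) = false := by
        simp only [pvIsLegalA, Bool.or_eq_true, beq_iff_eq] at hleg
        rcases hleg with h | h
        · rw [h]; simp
        · rw [h]; simp
      rw [hleg, hb]
      simp only [Bool.not_true, Bool.false_eq_true, if_false]
      by_cases hs : d.2 = "skip"
      · cases inc <;> simp [hs, sub_eq_add_neg] <;> exact ih' _ _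
      · by_cases hr : d.2 = "reverse"
        · cases inc <;> simp [hr, sub_eq_add_neg] <;> exact ih' _ _
        · cases inc <;> simp [hs, hr, sub_eq_add_neg] <;> exact ih' _ _
    · have hb : (c.1 != d.1 && c.2 != d.2) = true := by
        simp only [pvIsLegalA, Bool.or_eq_true, beq_iff_eq] at hleg
        rw [not_or] at hleg
        simp [bne_iff_ne, hleg.1, hleg.2]
      rw [Bool.not_eq_true] at hleg
      rw [hleg, hb]
      simp

-- key invariant 2: the single-pass simulation equals B's staged form (locate the
-- first illegal pair, then one displacement sum and one final modulo).
theorem pvLoopB_staged (np : Int) :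
    ∀ (tl : List (String × String)) (c : String × String) (pt : Int) (inc : Bool),
    pvLoopB np c tl (PySem.Int.mod pt np) inc
    = match pvFirstIllegal (c :: tl) with
      | none => none
      | some j => some (PySem.Int.mod (pvTotalDown (tl.take j) pt (!inc)) np) := by
  intro tl
  induction tl with
  | nil => intro c pt inc; rfl
  | cons d rest ih =>
    intro c pt inc
    by_cases hill : (c.1 != d.1 && c.2 != d.2) = true
    · rw [pvLoopB, pvFirstIllegal]
      simp [hill, pvTotalDown]
    · rw [pvLoopB, pvFirstIllegal]
      simp only [hill, Bool.false_eq_true, if_false]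
      rw [pvModAdd]
      rw [ih d _ _]
      by_cases hr : d.2 = "reverse"
      · cases h : pvFirstIllegal (d :: rest) <;>
          cases inc <;> simp [h, hr, pvTotalDown]
      · by_cases hs : d.2 = "skip"
        · cases h : pvFirstIllegal (d :: rest) <;>
            cases inc <;> simp [h, hr, hs, pvTotalDown]
        · cases h : pvFirstIllegal (d :: rest) <;>
            cases inc <;> simp [h, hr, hs, pvTotalDown]

-- ===== VERDICT (by name: the statement is the Claim_ definition above) =====
set_option maxRecDepth 4096 in
theorem catch_cheater_spec : Claim_equal_catch_cheater := by
  intro cards init np sp _ _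
  show catch_cheater cards init np sp = catch_cheater_alt cards init np sp
  cases cards with
  | nil => rfl
  | cons c0 tl =>
    rw [catch_cheater, catch_cheater_alt]
    simp only [List.length_cons, beq_iff_eq, Nat.succ_ne_zero, if_false]
    rw [PySem.List.pyGet?_zero_cons c0 tl]
    simp only [Option.getD_some]
    rw [pvFirstIllegal]
    have key : ∀ (pt : Int) (i : Bool),
        pvLoopA (c0 :: tl) np (PySem.List.pyRange 0 ((tl.length : Nat) : Int) 1) pt i
        = pvLoopB np c0 tl pt i := by
      intro pt i
      simpa using pvLoop_eq np tl [] c0 pt i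
    by_cases hleg : pvIsLegalA init c0 = true
    · have hb : (init.1 != c0.1 && init.2 != c0.2) = false := by
        simp only [pvIsLegalA, Bool.or_eq_true, beq_iff_eq] at hleg
        rcases hleg with h | h
        · rw [h]; simp
        · rw [h]; simp
      rw [hleg, hb]
      simp only [Bool.not_true, Bool.false_eq_true, if_false]
      have eb : ((tl.length + 1 : Nat) : Int) - 1 = ((tl.length : Nat) : Int) := by
        push_cast; ring
      by_cases hs : c0.2 = "skip"
      · rw [eb]
        simp only [hs]
        simp
        rw [key, pvLoopB_staged]
        cases h : pvFirstIllegal (c0 :: tl) <;>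
          simp [h, pvTotalDown, hs, pvTotalDown_shift, add_assoc]
      · by_cases hr : c0.2 = "reverse"
        · rw [eb]
          simp only [hr]
          simp
          rw [key, pvLoopB_staged]
          cases h : pvFirstIllegal (c0 :: tl) <;>
            simp [h, pvTotalDown, hr, pvTotalDown_shift, add_assoc, sub_eq_add_neg]
        · rw [eb]
          simp [hs, hr]
          rw [key, pvLoopB_staged]
          cases h : pvFirstIllegal (c0 :: tl) <;>
            simp [h, pvTotalDown, hs, hr, pvTotalDown_shift, add_assoc]
    · have hb : (init.1 != c0.1 && init.2 != c0.2) = true := by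
        simp only [pvIsLegalA, Bool.or_eq_true, beq_iff_eq] at hleg
        rw [not_or] at hleg
        simp [bne_iff_ne, hleg.1, hleg.2]
      rw [Bool.not_eq_true] at hleg
      rw [hleg, hb]
      simp
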